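-- pv_equiv track=rewrite | github.com/yuxin101/skills | skills/alfredjamesli/gui-claw/scripts/spreadsheet_utils.py | _find_row_number
-- ===== SOURCE A (Python) =====
-- def _find_row_number(ocr_results, row_num):
--     """Find the y-coordinate center of a row number."""
--     row_str = str(row_num)
--     candidates = []
--     for text, x, y, w, h in ocr_results:
--         clean = text.strip()
--         if clean == row_str and x < 100:  # in row number column (left side)
--             candidates.append((y + h // 2, x))
--
--     if candidates:
--         candidates.sort(key=lambda c: c[1])  # sort by x (leftmost = row number column)
--         return candidates[0][0]
--
--     return None
-- ===== SOURCE B (Python) =====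
-- def _find_row_number(ocr_results, row_num):
--     """Find the y-coordinate center of a row number (single min-scan, no list, no sort)."""
--     row_str = str(row_num)
--     best_x = None
--     best_y = None
--     for text, x, y, w, h in ocr_results:
--         if text.strip() == row_str and x < 100 and (best_x is None or x < best_x):
--             best_x = x
--             best_y = y + h // 2
--     return best_y
-- ===== Notes on version B (the rewrite author's own statement) =====
-- stated objective: simpler
-- what changed: Replaces the collect-all-candidates list plus stable sort-by-x plus take-first with a single pass keeping only the best (leftmost, first-seen on ties via strict <) match's x and y-center in two variables.
import Mathlib
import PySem

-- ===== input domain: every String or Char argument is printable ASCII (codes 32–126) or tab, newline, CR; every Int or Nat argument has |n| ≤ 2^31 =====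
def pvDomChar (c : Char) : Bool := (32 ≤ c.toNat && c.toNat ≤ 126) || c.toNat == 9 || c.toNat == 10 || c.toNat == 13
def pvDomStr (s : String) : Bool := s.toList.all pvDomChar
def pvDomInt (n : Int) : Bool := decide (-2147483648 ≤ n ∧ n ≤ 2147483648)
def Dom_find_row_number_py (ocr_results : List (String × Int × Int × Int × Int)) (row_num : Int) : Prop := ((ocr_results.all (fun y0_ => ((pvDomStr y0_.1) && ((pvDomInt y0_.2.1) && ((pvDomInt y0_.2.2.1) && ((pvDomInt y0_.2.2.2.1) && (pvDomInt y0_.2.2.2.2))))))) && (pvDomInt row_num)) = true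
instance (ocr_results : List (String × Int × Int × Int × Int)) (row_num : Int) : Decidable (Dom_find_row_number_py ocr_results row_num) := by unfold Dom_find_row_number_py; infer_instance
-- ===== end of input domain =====

-- B replaces A's candidate list + stable sort-by-x + take-first with a single min-scan
-- keeping the leftmost (first-seen on ties, via strict <) match's x and y-center; simpler.

-- ===== PORT A =====
def find_row_number_py (ocr_results : List (String × Int × Int × Int × Int)) (row_num : Int) : Option Int :=
  let row_str := PySem.Int.toStr row_num
  let candidates : List (Int × Int) := ocr_results.foldl
    (fun acc r =>
      let (text, x, y, _, h) := r
      let clean := PySem.Str.strip text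
      if clean == row_str && decide (x < 100) then
        acc ++ [(y + PySem.Int.floordiv h 2, x)]
      else acc) []
  if candidates.isEmpty then none
  else (PySem.List.sorted candidates (fun c => c.2) false).head?.map (fun c => c.1)

-- ===== PORT B =====
def find_row_number_py_alt (ocr_results : List (String × Int × Int × Int × Int)) (row_num : Int) : Option Int :=
  let row_str := PySem.Int.toStr row_num
  let st : Option Int × Option Int := ocr_results.foldl
    (fun best r =>
      let (text, x, y, _, h) := r
      let (best_x, best_y) := best
      if PySem.Str.strip text == row_str && decide (x < 100) &&
          (best_x.isNone || decide (x < best_x.getD 0)) then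
        (some x, some (y + PySem.Int.floordiv h 2))
      else (best_x, best_y)) (none, none)
  st.2

-- ===== PRECONDITION & SPEC =====
def Spec_find_row_number_py (ocr_results : List (String × Int × Int × Int × Int)) (row_num : Int) (out : Option Int) : Prop := out = find_row_number_py_alt ocr_results row_num
instance (ocr_results : List (String × Int × Int × Int × Int)) (row_num : Int) (out : Option Int) : Decidable (Spec_find_row_number_py ocr_results row_num out) := by unfold Spec_find_row_number_py; infer_instance

-- ===== CLAIM (what is proved, stated in full; the proofs are below) =====
def Claim_equal_find_row_number_py : Prop := ∀ (ocr_results : List (String × Int × Int × Int × Int)) (row_num : Int), Dom_find_row_number_py ocr_results row_num → Spec_find_row_number_py ocr_results row_num (find_row_number_py ocr_results row_num)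

-- ===== LEMMAS AND PROOFS =====

-- the candidate (y-center, x) extracted from one OCR row, shared by both loops
def pvCand (rs : String) (r : String × Int × Int × Int × Int) : Option (Int × Int) :=
  if PySem.Str.strip r.1 == rs && decide (r.2.1 < 100) then
    some (r.2.2.1 + PySem.Int.floordiv r.2.2.2.2 2, r.2.1)
  else none

-- A's loop body, named (definitionally the lambda inside find_row_number_py)
def pvAstep (rs : String) (acc : List (Int × Int)) (r : String × Int × Int × Int × Int) :
    List (Int × Int) :=
  let (text, x, y, _, h) := r
  let clean := PySem.Str.strip text
  if clean == rs && decide (x < 100) then acc ++ [(y + PySem.Int.floordiv h 2, x)] else acc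

-- B's loop body, named (definitionally the lambda inside find_row_number_py_alt)
def pvBstep (rs : String) (best : Option Int × Option Int) (r : String × Int × Int × Int × Int) :
    Option Int × Option Int :=
  let (text, x, y, _, h) := r
  let (best_x, best_y) := best
  if PySem.Str.strip text == rs && decide (x < 100) &&
      (best_x.isNone || decide (x < best_x.getD 0)) then
    (some x, some (y + PySem.Int.floordiv h 2))
  else (best_x, best_y)

-- first-minimum scan over the candidate list (strict <, first-seen wins on ties)
def pvStep (m : Option (Int × Int)) (c : Int × Int) : Option (Int × Int) :=
  match m with
  | none => some c
  | some h => if c.2 < h.2 then some c else m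

-- B's (best_x, best_y) state as a function of the abstract scan state
def pvEnc (m : Option (Int × Int)) : Option Int × Option Int :=
  match m with
  | none => (none, none)
  | some c => (some c.2, some c.1)

theorem pvA_step (rs : String) (acc : List (Int × Int)) (r : String × Int × Int × Int × Int) :
    pvAstep rs acc r = acc ++ (pvCand rs r).toList := by
  obtain ⟨text, x, y, w, h⟩ := r
  dsimp only [pvAstep, pvCand]
  by_cases hc : (PySem.Str.strip text == rs && decide (x < 100)) = true
  · simp [hc]
  · simp [hc]

theorem pvA_foldl (rs : String) (ocr : List (String × Int × Int × Int × Int))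
    (acc : List (Int × Int)) :
    ocr.foldl (pvAstep rs) acc = acc ++ ocr.filterMap (pvCand rs) := by
  induction ocr generalizing acc with
  | nil => simp
  | cons r t ih =>
    rw [List.foldl_cons, pvA_step, List.filterMap_cons]
    cases hcc : pvCand rs r with
    | none => simpa using ih acc
    | some c => simp [ih]

theorem pvB_step_enc (rs : String) (m : Option (Int × Int))
    (r : String × Int × Int × Int × Int) :
    pvBstep rs (pvEnc m) r =
      pvEnc (match pvCand rs r with | none => m | some c => pvStep m c) := by
  obtain ⟨text, x, y, w, h⟩ := r
  dsimp only [pvBstep, pvCand]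
  by_cases hc : (PySem.Str.strip text == rs && decide (x < 100)) = true
  · rw [if_pos hc]
    cases m with
    | none => simp [hc, pvStep, pvEnc]
    | some p =>
      by_cases hx : x < p.2
      · simp [hc, hx, pvStep, pvEnc]
      · simp [hc, hx, pvStep, pvEnc]
  · rw [if_neg hc]
    cases m with
    | none => simp [hc, pvEnc]
    | some p => simp [hc, pvEnc]

theorem pvB_foldl (rs : String) (ocr : List (String × Int × Int × Int × Int))
    (m : Option (Int × Int)) :
    ocr.foldl (pvBstep rs) (pvEnc m) =
      pvEnc ((ocr.filterMap (pvCand rs)).foldl pvStep m) := by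
  induction ocr generalizing m with
  | nil => rfl
  | cons r t ih =>
    rw [List.foldl_cons, pvB_step_enc, List.filterMap_cons]
    cases hcc : pvCand rs r with
    | none => exact ih m
    | some c => exact ih (pvStep m c)

theorem pvHead_insertBy (c : Int × Int) (l : List (Int × Int)) :
    (PySem.List.insertBy (fun a b : Int × Int => decide (a.2 < b.2)) c l).head? =
      pvStep l.head? c := by
  cases l with
  | nil => simp [PySem.List.insertBy, pvStep]
  | cons y ys =>
    by_cases h : c.2 < y.2
    · simp [PySem.List.insertBy, pvStep, h]
    · simp [PySem.List.insertBy, pvStep, h]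

theorem pvHead_sorted_foldl (cs : List (Int × Int)) (l : List (Int × Int)) :
    ((cs.foldl (fun acc x =>
        PySem.List.insertBy (fun a b : Int × Int => decide (a.2 < b.2)) x acc) l).head?) =
      cs.foldl pvStep l.head? := by
  induction cs generalizing l with
  | nil => rfl
  | cons c t ih => rw [List.foldl_cons, List.foldl_cons, ih, pvHead_insertBy]

theorem pvHead_sorted (cs : List (Int × Int)) :
    (PySem.List.sorted cs (fun c => c.2) false).head? = cs.foldl pvStep none := by
  rw [PySem.List.sorted_eq_foldl_insertBy]
  exact pvHead_sorted_foldl cs []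

theorem pv_foldl_some_ne_none (l : List (Int × Int)) (p : Int × Int) :
    l.foldl pvStep (some p) ≠ none := by
  induction l generalizing p with
  | nil => simp
  | cons a t ih =>
    rw [List.foldl_cons]
    show t.foldl pvStep (pvStep (some p) a) ≠ none
    dsimp only [pvStep]
    by_cases ha : a.2 < p.2
    · rw [if_pos ha]; exact ih a
    · rw [if_neg ha]; exact ih p

theorem pvMain (ocr : List (String × Int × Int × Int × Int)) (row_num : Int) :
    find_row_number_py ocr row_num = find_row_number_py_alt ocr row_num := by
  have hcs : ocr.foldl (pvAstep (PySem.Int.toStr row_num)) [] =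
      ocr.filterMap (pvCand (PySem.Int.toStr row_num)) := by
    simpa using pvA_foldl (PySem.Int.toStr row_num) ocr []
  have hA : find_row_number_py ocr row_num =
      (if (ocr.filterMap (pvCand (PySem.Int.toStr row_num))).isEmpty then none
       else ((PySem.List.sorted (ocr.filterMap (pvCand (PySem.Int.toStr row_num)))
              (fun c => c.2) false).head?.map (fun c => c.1))) := by
    rw [← hcs]; rfl
  have hB : find_row_number_py_alt ocr row_num =
      (pvEnc ((ocr.filterMap (pvCand (PySem.Int.toStr row_num))).foldl pvStep none)).2 := by
    rw [← pvB_foldl (PySem.Int.toStr row_num) ocr none]; rfl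
  rw [hA, hB]
  cases h : (ocr.filterMap (pvCand (PySem.Int.toStr row_num))).foldl pvStep none with
  | none =>
    have hnil : ocr.filterMap (pvCand (PySem.Int.toStr row_num)) = [] := by
      cases hcs2 : ocr.filterMap (pvCand (PySem.Int.toStr row_num)) with
      | nil => rfl
      | cons c cs =>
        rw [hcs2, List.foldl_cons] at h
        exact absurd h (pv_foldl_some_ne_none cs c)
    simp [hnil, pvEnc]
  | some p =>
    have hne : (ocr.filterMap (pvCand (PySem.Int.toStr row_num))).isEmpty = false := by
      cases hcs2 : ocr.filterMap (pvCand (PySem.Int.toStr row_num)) with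
      | nil => rw [hcs2] at h; simp at h
      | cons c cs => simp
    rw [hne, if_neg Bool.false_ne_true, pvHead_sorted, h]
    rfl

-- ===== VERDICT (by name: the statement is the Claim_ definition above) =====
theorem find_row_number_py_spec : Claim_equal_find_row_number_py := by
  intro ocr row_num _
  unfold Spec_find_row_number_py
  exact pvMain ocr row_num
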